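-- pv_equiv track=rewrite | github.com/acederberg/quarto-maths | dsa/leetcode/parentheses/__init__.py | parse
-- ===== SOURCE A (Python) =====
-- from typing import Iterator
--
-- def parse(expression: str) -> Iterator[tuple[str, str]]:
--
--     current = ""
--     for char in expression:
--         if char.isnumeric():
--             current += char
--         else:
--             yield (current, char)
--             current = ""
--
--     yield (current, "")
-- ===== SOURCE B (Python) =====
-- def parse(expression):
--     i, n = 0, len(expression)
--     while i < n:
--         j = i
--         while j < n and expression[j].isnumeric():
--             j += 1
--         if j < n:
--             yield (expression[i:j], expression[j])
--             i = j + 1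
--         else:
--             yield (expression[i:j], "")
--             return
--     yield ("", "")
-- ===== Notes on version B (the rewrite author's own statement) =====
-- stated objective: alternative
-- what changed: Replaced A's single accumulate-and-reset pass (a running 'current' buffer reset at each separator) with a nested two-pointer run scanner that consumes each maximal numeric run with an inner loop and slices it out, returning early on a trailing run.
import Mathlib
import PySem

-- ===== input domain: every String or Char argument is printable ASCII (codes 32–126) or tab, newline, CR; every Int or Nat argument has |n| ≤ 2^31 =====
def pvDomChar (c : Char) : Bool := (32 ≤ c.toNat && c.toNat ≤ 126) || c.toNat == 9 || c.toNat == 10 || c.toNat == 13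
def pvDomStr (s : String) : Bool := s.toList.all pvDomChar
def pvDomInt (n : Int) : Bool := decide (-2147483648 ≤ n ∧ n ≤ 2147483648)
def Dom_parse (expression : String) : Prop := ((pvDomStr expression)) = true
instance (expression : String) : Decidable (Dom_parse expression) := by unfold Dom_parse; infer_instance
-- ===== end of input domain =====

-- B replaces A's accumulate-and-reset pass with a nested two-pointer run scanner; objective: alternative decomposition.
-- Python's str.isnumeric coincides with PySem.Chars.isdigit on the ASCII domain Dom_parse.

-- ===== PORT A =====
-- A's loop: 'current' accumulator, reset at each non-numeric char; final (current, "") yield.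
def parseGoA : List Char → List Char → List (String × String)
  | [], current => [(String.ofList current, "")]
  | c :: cs, current =>
      if PySem.Chars.isdigit c then parseGoA cs (current ++ [c])
      else (String.ofList current, String.ofList [c]) :: parseGoA cs []

def parse (expression : String) : List (String × String) :=
  parseGoA expression.toList []

-- ===== PORT B =====
-- B's outer while over the remaining suffix; the inner while 'j' loop over the
-- maximal numeric run is takeWhile/dropWhile; early return on a trailing run,
-- final ("","") when the loop exhausts the string via a separator.
def parseGoB : List Char → List (String × String)
  | [] => [("", "")]
  | c :: cs =>
      match _h : (c :: cs).dropWhile PySem.Chars.isdigit with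
      | [] => [(String.ofList ((c :: cs).takeWhile PySem.Chars.isdigit), "")]
      | d :: rest =>
          (String.ofList ((c :: cs).takeWhile PySem.Chars.isdigit), String.ofList [d]) :: parseGoB rest
  termination_by l => l.length
  decreasing_by
    have h1 : ((c :: cs).dropWhile PySem.Chars.isdigit).length ≤ (c :: cs).length :=
      List.length_dropWhile_le _ _
    rw [_h] at h1
    simp at h1 ⊢
    omega

def parse_alt (expression : String) : List (String × String) :=
  parseGoB expression.toList

-- ===== PRECONDITION & SPEC =====
def Spec_parse (expression : String) (out : List (String × String)) : Prop := out = parse_alt expression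
instance (expression : String) (out : List (String × String)) : Decidable (Spec_parse expression out) := by unfold Spec_parse; infer_instance

-- ===== CLAIM (what is proved, stated in full; the proofs are below) =====
def Claim_equal_parse : Prop := ∀ (expression : String), Dom_parse expression → Spec_parse expression (parse expression)

-- ===== LEMMAS AND PROOFS =====

/-- Prepend `acc` to the first component of the head (empty list stays empty). -/
def consAcc (acc : List Char) : List (String × String) → List (String × String)
  | [] => []
  | (s, t) :: r => (String.ofList acc ++ s, t) :: r

/-- Non-dependent unfolding of `parseGoB` (the `[]` case folds into the run case since
`String.ofList [] = ""`). -/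
theorem parseGoB_eq (l : List Char) : parseGoB l =
    match l.dropWhile PySem.Chars.isdigit with
    | [] => [(String.ofList (l.takeWhile PySem.Chars.isdigit), "")]
    | d :: rest => (String.ofList (l.takeWhile PySem.Chars.isdigit), String.ofList [d]) :: parseGoB rest := by
  cases l with
  | nil => rw [parseGoB]; simp
  | cons c cs =>
      rw [parseGoB]
      rcases h : (c :: cs).dropWhile PySem.Chars.isdigit with _ | ⟨d, rest⟩ <;> rfl

theorem consAcc_nil (l : List (String × String)) : consAcc [] l = l := by
  cases l with
  | nil => rfl
  | cons p r => cases p; simp [consAcc]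

theorem consAcc_consAcc (a b : List Char) (l : List (String × String)) :
    consAcc a (consAcc b l) = consAcc (a ++ b) l := by
  cases l with
  | nil => rfl
  | cons p r => cases p; simp [consAcc, String.ofList_append, String.append_assoc]

theorem parseGoB_cons_digit (c : Char) (cs : List Char) (hc : PySem.Chars.isdigit c = true) :
    parseGoB (c :: cs) = consAcc [c] (parseGoB cs) := by
  rw [parseGoB_eq (c :: cs), parseGoB_eq cs]
  have hdw : (c :: cs).dropWhile PySem.Chars.isdigit = cs.dropWhile PySem.Chars.isdigit := by
    simp [List.dropWhile, hc]
  have htw : (c :: cs).takeWhile PySem.Chars.isdigit = c :: cs.takeWhile PySem.Chars.isdigit := by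
    simp [List.takeWhile, hc]
  rw [hdw, htw]
  cases hdw2 : cs.dropWhile PySem.Chars.isdigit with
  | nil => simp [consAcc, ← String.ofList_append]
  | cons d rest => simp [consAcc, ← String.ofList_append]

theorem parseGoA_eq (cs : List Char) : ∀ acc, parseGoA cs acc = consAcc acc (parseGoB cs) := by
  induction cs with
  | nil =>
      intro acc
      simp [parseGoA, parseGoB, consAcc]
  | cons c cs ih =>
      intro acc
      by_cases hc : PySem.Chars.isdigit c = true
      · rw [parseGoA]
        simp only [hc, if_true]
        rw [ih, parseGoB_cons_digit c cs hc, consAcc_consAcc]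
      · have hc' : PySem.Chars.isdigit c = false := by
          cases h : PySem.Chars.isdigit c
          · rfl
          · exact absurd h hc
        rw [parseGoA]
        simp only [hc', if_false, Bool.false_eq_true]
        rw [ih [], consAcc_nil]
        rw [parseGoB_eq (c :: cs)]
        have hdw : (c :: cs).dropWhile PySem.Chars.isdigit = c :: cs := by
          simp [List.dropWhile, hc']
        have htw : (c :: cs).takeWhile PySem.Chars.isdigit = [] := by
          simp [List.takeWhile, hc']
        rw [hdw, htw]
        simp [consAcc]

-- ===== VERDICT (by name: the statement is the Claim_ definition above) =====
theorem parse_spec : Claim_equal_parse := by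
  intro e _
  unfold Spec_parse parse parse_alt
  rw [parseGoA_eq, consAcc_nil]
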